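-- pv_equiv track=rewrite | github.com/PINTO0309/human-instance-segmentation | analyze_model_complexity.py | estimate_flops
-- ===== SOURCE A (Python) =====
-- def estimate_flops(model_type, roi_size=28, mask_size=56):
--     """Estimate FLOPs for different model types."""
--     # Rough estimation based on architecture
--     if model_type == 'baseline':
--         # ROIAlign + Decoder
--         roi_features = roi_size * roi_size * 1024
--         decoder_flops = roi_features * 256 * 2  # Two conv layers
--         upsampling_flops = mask_size * mask_size * 256 * 3  # Upsampling layers
--         return decoder_flops + upsampling_flops
--
--     elif model_type == 'multiscale':
--         # Multi-scale fusion + Decoder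
--         baseline_flops = estimate_flops('baseline', roi_size, mask_size)
--         fusion_flops = 3 * roi_size * roi_size * 256  # Three scales fusion
--         return baseline_flops + fusion_flops
--
--     elif model_type == 'cascade':
--         # Multiple stages
--         single_stage = estimate_flops('baseline', roi_size, mask_size)
--         return single_stage * 3  # 3 stages
--
--     elif model_type == 'all_features':
--         # Everything combined
--         multiscale_flops = estimate_flops('multiscale', roi_size, mask_size)
--         cascade_multiplier = 3
--         return multiscale_flops * cascade_multiplier
-- ===== SOURCE B (Python) =====
-- _COEFFS = {
--     'baseline':     (524288, 768),
--     'multiscale':   (525056, 768),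
--     'cascade':      (1572864, 2304),
--     'all_features': (1575168, 2304),
-- }
--
-- def estimate_flops(model_type, roi_size=28, mask_size=56):
--     """Estimate FLOPs via a coefficient table: flops = cr*roi^2 + cm*mask^2."""
--     c = _COEFFS.get(model_type)
--     if c is None:
--         return None
--     cr, cm = c
--     return cr * roi_size * roi_size + cm * mask_size * mask_size
-- ===== Notes on version B (the rewrite author's own statement) =====
-- stated objective: simpler
-- what changed: Replaced the recursive four-branch chain by a single coefficient table (cr, cm) per model type and one closed-form expression cr*roi^2 + cm*mask^2; no recursion, no branches.
-- outside the precondition, e.g. on estimate_flops('unknown', 28, 56): A returns None, B returns None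
import Mathlib
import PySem

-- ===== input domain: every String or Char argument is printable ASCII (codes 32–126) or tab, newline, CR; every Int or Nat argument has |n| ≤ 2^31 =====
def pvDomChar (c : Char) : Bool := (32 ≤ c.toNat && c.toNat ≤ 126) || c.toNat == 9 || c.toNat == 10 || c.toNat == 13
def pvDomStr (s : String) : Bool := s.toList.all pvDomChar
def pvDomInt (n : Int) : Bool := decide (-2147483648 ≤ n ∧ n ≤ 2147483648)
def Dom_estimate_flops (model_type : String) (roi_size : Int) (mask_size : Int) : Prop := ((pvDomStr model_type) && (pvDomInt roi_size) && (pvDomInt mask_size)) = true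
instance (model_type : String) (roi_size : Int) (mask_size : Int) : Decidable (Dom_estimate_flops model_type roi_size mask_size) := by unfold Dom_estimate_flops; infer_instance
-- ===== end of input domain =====

-- B replaces A's recursive branch chain by a coefficient table and one closed-form expression (objective: simpler).
-- Pre_ excludes unrecognized model types, on which A returns None (no Int value).
-- ===== PORT A =====
-- Fuel only makes A's bounded self-recursion structurally total; on unrecognized model types
-- (outside Pre_) the Python returns None, here represented by 0 (nothing is claimed there).
def estimate_flopsF (fuel : Nat) (model_type : String) (roi_size : Int) (mask_size : Int) : Int :=
  match fuel with
  | 0 => 0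
  | fuel + 1 =>
    if model_type == "baseline" then
      let roi_features := roi_size * roi_size * 1024
      let decoder_flops := roi_features * 256 * 2
      let upsampling_flops := mask_size * mask_size * 256 * 3
      decoder_flops + upsampling_flops
    else if model_type == "multiscale" then
      let baseline_flops := estimate_flopsF fuel "baseline" roi_size mask_size
      let fusion_flops := 3 * roi_size * roi_size * 256
      baseline_flops + fusion_flops
    else if model_type == "cascade" then
      let single_stage := estimate_flopsF fuel "baseline" roi_size mask_size
      single_stage * 3
    else if model_type == "all_features" then
      let multiscale_flops := estimate_flopsF fuel "multiscale" roi_size mask_size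
      let cascade_multiplier := (3 : Int)
      multiscale_flops * cascade_multiplier
    else 0

def estimate_flops (model_type : String) (roi_size : Int) (mask_size : Int) : Int :=
  estimate_flopsF 3 model_type roi_size mask_size

-- ===== PORT B =====
def pvCoeffs : PySem.Dict String (Int × Int) :=
  PySem.Dict.mk
    [("baseline", (524288, 768)), ("multiscale", (525056, 768)),
     ("cascade", (1572864, 2304)), ("all_features", (1575168, 2304))]

def estimate_flops_alt (model_type : String) (roi_size : Int) (mask_size : Int) : Int :=
  match PySem.Dict.get? pvCoeffs model_type with
  | none => 0   -- Python B returns None here; outside Pre_, nothing claimed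
  | some (cr, cm) => cr * roi_size * roi_size + cm * mask_size * mask_size

-- ===== PRECONDITION & SPEC =====
-- Pre_ excludes exactly the model types on which A falls through all branches and returns None.
def Pre_estimate_flops (model_type : String) (roi_size : Int) (mask_size : Int) : Prop :=
  model_type = "baseline" ∨ model_type = "multiscale" ∨ model_type = "cascade" ∨ model_type = "all_features"
instance (model_type : String) (roi_size : Int) (mask_size : Int) : Decidable (Pre_estimate_flops model_type roi_size mask_size) := by unfold Pre_estimate_flops; infer_instance
def pvWitness_estimate_flops : String × Int × Int := ("baseline", 28, 56)
def Spec_estimate_flops (model_type : String) (roi_size : Int) (mask_size : Int) (out : Int) : Prop := out = estimate_flops_alt model_type roi_size mask_size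
instance (model_type : String) (roi_size : Int) (mask_size : Int) (out : Int) : Decidable (Spec_estimate_flops model_type roi_size mask_size out) := by unfold Spec_estimate_flops; infer_instance

-- ===== CLAIM (what is proved, stated in full; the proofs are below) =====
def Claim_equal_estimate_flops : Prop := ∀ (model_type : String) (roi_size : Int) (mask_size : Int), Dom_estimate_flops model_type roi_size mask_size → Pre_estimate_flops model_type roi_size mask_size → Spec_estimate_flops model_type roi_size mask_size (estimate_flops model_type roi_size mask_size)

-- ===== LEMMAS AND PROOFS =====

-- ===== VERDICT (by name: the statement is the Claim_ definition above) =====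
theorem estimate_flops_spec : Claim_equal_estimate_flops := by
  intro mt r m _ hpre
  unfold Spec_estimate_flops
  rcases hpre with h | h | h | h <;> subst h <;>
    simp [estimate_flops, estimate_flopsF, estimate_flops_alt, pvCoeffs,
      PySem.Dict.get?, PySem.Dict.items, List.find?] <;> ring
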